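-- pv_equiv track=rewrite | github.com/jedlickap/dante_ltr_parser | python_scripts/te_position_in_bins.py | get_mbp_bins
-- ===== SOURCE A (Python) =====
-- def get_mbp_bins(head, ch_len):
--     l = []
--     step = 1
--     start = 0
--     end = 1_000_000
--     while (ch_len - end) >= 1_000_000:
--         l.append(f"{head}|{step}|{start}|{end}")
--         start = end
--         end += 1_000_000
--         step += 1
--     l.append(f"{head}|{step}|{start}|{end}")
--     return l
-- ===== SOURCE B (Python) =====
-- def _bins(head, lo, hi):
--     # emit labels for bin indices lo..hi-1 by divide and conquer (requires lo < hi)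
--     if hi - lo == 1:
--         return [f"{head}|{lo + 1}|{lo * 1_000_000}|{(lo + 1) * 1_000_000}"]
--     mid = (lo + hi) // 2
--     return _bins(head, lo, mid) + _bins(head, mid, hi)
--
-- def get_mbp_bins(head, ch_len):
--     n = max((ch_len - 1_000_000) // 1_000_000, 0) + 1
--     return _bins(head, 0, n)
-- ===== Notes on version B (the rewrite author's own statement) =====
-- stated objective: alternative
-- what changed: Replaces A's sequential while loop with mutable step/start/end state and a post-loop special-case append by a divide-and-conquer recursion: the closed-form bin count n is computed once and the labels for index range [0,n) are produced by recursively splitting the range at its midpoint and concatenating the halves.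
import Mathlib
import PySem

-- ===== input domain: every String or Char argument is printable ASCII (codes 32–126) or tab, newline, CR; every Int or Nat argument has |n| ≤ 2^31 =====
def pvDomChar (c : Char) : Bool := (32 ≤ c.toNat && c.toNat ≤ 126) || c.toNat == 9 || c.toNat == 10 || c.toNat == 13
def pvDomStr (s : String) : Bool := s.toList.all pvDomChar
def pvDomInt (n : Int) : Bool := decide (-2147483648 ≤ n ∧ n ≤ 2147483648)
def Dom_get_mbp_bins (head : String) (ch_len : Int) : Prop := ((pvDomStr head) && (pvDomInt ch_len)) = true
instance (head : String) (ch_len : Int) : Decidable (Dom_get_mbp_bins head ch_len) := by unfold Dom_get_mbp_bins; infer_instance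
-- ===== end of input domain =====

-- B replaces A's sequential while loop with mutable step/start/end state and a post-loop
-- special-case append by a divide-and-conquer recursion over the bin index range (alternative decomposition).


-- ===== PORT A =====
-- the while loop of A, with state (l, step, start, end); terminates because end grows by 1_000_000
def getMbpBinsLoop (head : String) (ch_len : Int) (l : List String)
    (step start e : Int) : List String :=
  if _h : ch_len - e ≥ 1000000 then
    getMbpBinsLoop head ch_len
      (l ++ [head ++ "|" ++ PySem.Int.toStr step ++ "|" ++ PySem.Int.toStr start ++ "|" ++ PySem.Int.toStr e])
      (step + 1) e (e + 1000000)
  else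
    l ++ [head ++ "|" ++ PySem.Int.toStr step ++ "|" ++ PySem.Int.toStr start ++ "|" ++ PySem.Int.toStr e]
termination_by (ch_len - e).toNat
decreasing_by omega

def get_mbp_bins (head : String) (ch_len : Int) : List String :=
  getMbpBinsLoop head ch_len [] 1 0 1000000

-- ===== PORT B =====
-- _bins from Source B: labels for bin indices lo..hi-1 by splitting the range at its midpoint.
-- Python tests 'hi - lo == 1'; the port's guard is 'hi - lo ≤ 1' only to make the recursion
-- total (the two coincide on every reachable call, since lo < hi throughout).
def pvBinsDC (head : String) (lo hi : Int) : List String :=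
  if _h : hi - lo ≤ 1 then
    [head ++ "|" ++ PySem.Int.toStr (lo + 1) ++ "|" ++ PySem.Int.toStr (lo * 1000000)
      ++ "|" ++ PySem.Int.toStr ((lo + 1) * 1000000)]
  else
    pvBinsDC head lo (PySem.Int.floordiv (lo + hi) 2) ++
    pvBinsDC head (PySem.Int.floordiv (lo + hi) 2) hi
termination_by (hi - lo).toNat
decreasing_by
  · have h1 := (PySem.Int.le_floordiv_iff_mul_le (a := lo + hi) (q := lo + 1) (by norm_num : (0:Int) < 2)).2 (by omega)
    have h2 := (PySem.Int.floordiv_lt_iff_lt_mul (a := lo + hi) (q := hi) (by norm_num : (0:Int) < 2)).2 (by omega)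
    omega
  · have h1 := (PySem.Int.le_floordiv_iff_mul_le (a := lo + hi) (q := lo + 1) (by norm_num : (0:Int) < 2)).2 (by omega)
    omega

def get_mbp_bins_alt (head : String) (ch_len : Int) : List String :=
  let n : Int := max (PySem.Int.floordiv (ch_len - 1000000) 1000000) 0 + 1
  pvBinsDC head 0 n

-- ===== PRECONDITION & SPEC =====
def Spec_get_mbp_bins (head : String) (ch_len : Int) (out : List String) : Prop := out = get_mbp_bins_alt head ch_len
instance (head : String) (ch_len : Int) (out : List String) : Decidable (Spec_get_mbp_bins head ch_len out) := by unfold Spec_get_mbp_bins; infer_instance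

-- ===== CLAIM (what is proved, stated in full; the proofs are below) =====
def Claim_equal_get_mbp_bins : Prop := ∀ (head : String) (ch_len : Int), Dom_get_mbp_bins head ch_len → Spec_get_mbp_bins head ch_len (get_mbp_bins head ch_len)

-- ===== LEMMAS AND PROOFS =====

-- the closed-form bin count of B (proof-local abbreviation)
def pvN (ch_len : Int) : Int := max (PySem.Int.floordiv (ch_len - 1000000) 1000000) 0 + 1

theorem pvN_eq (ch_len : Int) : pvN ch_len = max (PySem.Int.floordiv (ch_len - 1000000) 1000000) 0 + 1 := rfl

-- the bin label shared by both characterisations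
def pvLabel (head : String) (i : Int) : String :=
  head ++ "|" ++ PySem.Int.toStr (i + 1) ++ "|" ++ PySem.Int.toStr (i * 1000000)
    ++ "|" ++ PySem.Int.toStr ((i + 1) * 1000000)

-- the while-loop's guard, in terms of the closed-form count
theorem pv_guard_iff (ch_len step : Int) (h1 : 1 ≤ step) :
    ch_len - step * 1000000 ≥ 1000000 ↔ step < pvN ch_len := by
  rw [pvN_eq]
  constructor
  · intro hge
    have hq : step ≤ PySem.Int.floordiv (ch_len - 1000000) 1000000 := by
      rw [PySem.Int.le_floordiv_iff_mul_le (by norm_num)]; omega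
    omega
  · intro hlt
    have hq : step ≤ PySem.Int.floordiv (ch_len - 1000000) 1000000 := by omega
    have := (PySem.Int.le_floordiv_iff_mul_le (b := (1000000 : Int)) (by norm_num)).1 hq
    omega

-- loop invariant: at entry of an iteration with counter `step`, start = (step-1)*1e6,
-- end = step*1e6, and the loop will emit exactly the labels for indices step-1 … n-1
theorem getMbpBinsLoop_eq (head : String) (ch_len : Int) (k : Nat) :
    ∀ (step : Int) (l : List String),
    1 ≤ step → step ≤ pvN ch_len → (pvN ch_len - step).toNat = k →
    getMbpBinsLoop head ch_len l step ((step - 1) * 1000000) (step * 1000000) =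
      l ++ (PySem.List.pyRange (step - 1) (pvN ch_len) 1).map (pvLabel head) := by
  induction k with
  | zero =>
    intro step l h1 h2 hk
    have hstep : step = pvN ch_len := by omega
    have hcond : ¬ ch_len - step * 1000000 ≥ 1000000 := by
      rw [pv_guard_iff ch_len step h1]; omega
    rw [getMbpBinsLoop, dif_neg hcond]
    rw [PySem.List.pyRange_one_cons (by omega : step - 1 < pvN ch_len)]
    have hr2 : PySem.List.pyRange (step - 1 + 1) (pvN ch_len) 1 = [] := by
      have he : step - 1 + 1 = pvN ch_len := by omega
      rw [he]; simp [PySem.List.pyRange]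
    rw [hr2]
    simp only [List.map_cons, List.map_nil, pvLabel]
    rw [show step - 1 + 1 = step from by omega]
  | succ k ih =>
    intro step l h1 h2 hk
    have hcond : ch_len - step * 1000000 ≥ 1000000 := by
      rw [pv_guard_iff ch_len step h1]; omega
    rw [getMbpBinsLoop, dif_pos hcond]
    have he3 : step * 1000000 + 1000000 = (step + 1) * 1000000 := by ring
    rw [he3]
    have hrec := ih (step + 1)
      (l ++ [head ++ "|" ++ PySem.Int.toStr step ++ "|" ++ PySem.Int.toStr ((step - 1) * 1000000)
        ++ "|" ++ PySem.Int.toStr (step * 1000000)])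
      (by omega) (by omega) (by omega)
    have he1 : step + 1 - 1 = step := by omega
    rw [he1] at hrec
    rw [hrec]
    rw [PySem.List.pyRange_one_cons (by omega : step - 1 < pvN ch_len)]
    have he2 : step - 1 + 1 = step := by omega
    rw [he2]
    simp only [List.map_cons, List.append_assoc, List.cons_append, List.nil_append, pvLabel]
    rw [he2]

-- the divide-and-conquer recursion emits exactly the labels for indices lo … hi-1
theorem pvBinsDC_eq (head : String) (k : Nat) :
    ∀ (lo hi : Int), lo < hi → (hi - lo).toNat = k →
    pvBinsDC head lo hi = (PySem.List.pyRange lo hi 1).map (pvLabel head) := by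
  induction k using Nat.strong_induction_on with
  | _ k ih =>
    intro lo hi hlt hk
    rw [pvBinsDC]
    by_cases h1 : hi - lo ≤ 1
    · rw [dif_pos h1]
      have : hi = lo + 1 := by omega
      subst this
      rw [PySem.List.pyRange_one_singleton]
      simp [pvLabel]
    · rw [dif_neg h1]
      have hm1 := (PySem.Int.le_floordiv_iff_mul_le (a := lo + hi) (q := lo + 1) (by norm_num : (0:Int) < 2)).2 (by omega)
      have hm2 := (PySem.Int.floordiv_lt_iff_lt_mul (a := lo + hi) (q := hi) (by norm_num : (0:Int) < 2)).2 (by omega)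
      set mid := PySem.Int.floordiv (lo + hi) 2 with hmid
      rw [ih (mid - lo).toNat (by omega) lo mid (by omega) rfl,
          ih (hi - mid).toNat (by omega) mid hi (by omega) rfl,
          ← List.map_append,
          ← PySem.List.pyRange_one_append lo mid hi (by omega) (by omega)]

-- ===== VERDICT (by name: the statement is the Claim_ definition above) =====
theorem get_mbp_bins_spec : Claim_equal_get_mbp_bins := by
  intro head ch_len _hdom
  unfold Spec_get_mbp_bins get_mbp_bins get_mbp_bins_alt
  have h := getMbpBinsLoop_eq head ch_len (pvN ch_len - 1).toNat 1 []
    (by omega) (by rw [pvN_eq]; omega) rfl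
  simp only [show (1:Int) - 1 = 0 by omega, show (1:Int) * 1000000 = 1000000 by ring,
    zero_mul, List.nil_append, pvN_eq] at h
  rw [h]
  show _ = pvBinsDC head 0 (pvN ch_len)
  rw [pvBinsDC_eq head (pvN ch_len - 0).toNat 0 (pvN ch_len) (by rw [pvN_eq]; omega) rfl, pvN_eq]
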